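-- pv_equiv track=rewrite | github.com/mwestera/aiminor23 | langgen_ngrams.py | extract_continuation_probabilities
-- ===== SOURCE A (Python) =====
-- def extract_continuation_probabilities(words, n=3):
--
--     prefix_to_ngrams = {}
--     for i in range(len(words) - (n - 1)):
--         ngram = tuple(words[i:i+n])
--         prefix = ngram[:(n-1)]
--         if prefix not in prefix_to_ngrams:
--             prefix_to_ngrams[prefix] = []
--         prefix_to_ngrams[prefix].append(ngram)
--
--     big_counts_dictionary = {}
--     for prefix, ngrams in prefix_to_ngrams.items():
--         continuations = [ngram[-1] for ngram in ngrams]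
--         counts = {word: 0 for word in continuations}
--         for word in continuations:
--             counts[word] += 1
--         big_counts_dictionary[prefix] = counts
--
--     return big_counts_dictionary
-- ===== SOURCE B (Python) =====
-- def extract_continuation_probabilities(words, n=3):
--     big_counts_dictionary = {}
--     for i in range(len(words) - (n - 1)):
--         prefix = tuple(words[i:i+n-1])
--         continuation = words[i+n-1]
--         inner = big_counts_dictionary.setdefault(prefix, {})
--         inner[continuation] = inner.get(continuation, 0) + 1
--     return big_counts_dictionary
-- ===== Notes on version B (the rewrite author's own statement) =====
-- stated objective: simpler
-- what changed: Replaces A's two-phase algorithm (build a prefix-to-ngrams table, then a separate pass that zero-initialises and re-counts continuations per group) with a single pass that increments a nested counter dict directly via setdefault.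
import Mathlib
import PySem

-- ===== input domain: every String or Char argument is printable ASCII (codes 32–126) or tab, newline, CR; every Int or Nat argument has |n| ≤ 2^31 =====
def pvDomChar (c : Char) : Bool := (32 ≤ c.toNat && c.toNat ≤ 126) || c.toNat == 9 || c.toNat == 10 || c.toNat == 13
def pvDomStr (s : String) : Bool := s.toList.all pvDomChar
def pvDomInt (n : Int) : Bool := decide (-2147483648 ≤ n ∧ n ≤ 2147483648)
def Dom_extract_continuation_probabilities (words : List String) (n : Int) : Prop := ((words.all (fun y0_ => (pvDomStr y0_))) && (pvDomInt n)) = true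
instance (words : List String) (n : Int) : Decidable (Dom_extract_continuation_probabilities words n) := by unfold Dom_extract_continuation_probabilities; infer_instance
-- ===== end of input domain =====

-- B replaces A's two-phase (group n-grams by prefix, then re-count continuations per group) by a single
-- pass that increments a nested counter dict directly; same return value (a dict of per-prefix
-- continuation counts) on every n ≥ 1.

-- ===== PORT A =====
def extract_continuation_probabilities (words : List String) (n : Int) : List (List String × List (String × Int)) :=
  let prefix_to_ngrams : PySem.Dict (List String) (List (List String)) :=
    (PySem.List.pyRange 0 ((words.length : Int) - (n - 1))).foldl
      (fun d i =>
        let ngram := PySem.List.slice words (some i) (some (i + n))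
        let pfx := PySem.List.slice ngram none (some (n - 1))
        let d' := if d.contains pfx then d else d.insert pfx []
        d'.modify pfx [] (· ++ [ngram]))
      PySem.Dict.empty
  let big_counts_dictionary : PySem.Dict (List String) (PySem.Dict String Int) :=
    prefix_to_ngrams.items.foldl
      (fun d p =>
        -- continuations = [ngram[-1] for ngram in ngrams]; ngram[-1] never raises under Pre_ (each ngram has length n ≥ 1)
        let continuations := p.2.map (fun g => (PySem.List.pyGet? g (-1)).getD "")
        let counts0 := continuations.foldl (fun c w => c.insert w 0) PySem.Dict.empty
        let counts := continuations.foldl (fun c w => c.modify w 0 (· + 1)) counts0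
        d.insert p.1 counts)
      PySem.Dict.empty
  big_counts_dictionary.items.map (fun p => (p.1, p.2.items))

-- ===== PORT B =====
def extract_continuation_probabilities_alt (words : List String) (n : Int) : List (List String × List (String × Int)) :=
  let big_counts_dictionary : PySem.Dict (List String) (PySem.Dict String Int) :=
    (PySem.List.pyRange 0 ((words.length : Int) - (n - 1))).foldl
      (fun d i =>
        let pfx := PySem.List.slice words (some i) (some (i + n - 1))
        -- words[i+n-1] never raises under Pre_ (0 ≤ i and i + n ≤ len(words))
        let cont := (PySem.List.pyGet? words (i + n - 1)).getD ""
        -- inner = d.setdefault(pfx, {}); inner[cont] = inner.get(cont, 0) + 1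
        d.modify pfx PySem.Dict.empty
          (fun inner => inner.insert cont (inner.getD cont 0 + 1)))
      PySem.Dict.empty
  big_counts_dictionary.items.map (fun p => (p.1, p.2.items))

-- ===== PRECONDITION & SPEC =====
-- Pre_ excludes exactly n ≤ 0: there Python A always raises IndexError (the n-grams are empty tuples
-- and ngram[-1] fails); for every n ≥ 1 A returns normally.
def Pre_extract_continuation_probabilities (words : List String) (n : Int) : Prop := 1 ≤ n
instance (words : List String) (n : Int) : Decidable (Pre_extract_continuation_probabilities words n) := by unfold Pre_extract_continuation_probabilities; infer_instance
def pvWitness_extract_continuation_probabilities : List String × Int := (["a", "b", "a", "b", "c"], 2)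

def Spec_extract_continuation_probabilities (words : List String) (n : Int) (out : List (List String × List (String × Int))) : Prop := out = extract_continuation_probabilities_alt words n
instance (words : List String) (n : Int) (out : List (List String × List (String × Int))) : Decidable (Spec_extract_continuation_probabilities words n out) := by unfold Spec_extract_continuation_probabilities; infer_instance

-- ===== CLAIM (what is proved, stated in full; the proofs are below) =====
def Claim_equal_extract_continuation_probabilities : Prop := ∀ (words : List String) (n : Int), Dom_extract_continuation_probabilities words n → Pre_extract_continuation_probabilities words n → Spec_extract_continuation_probabilities words n (extract_continuation_probabilities words n)

-- ===== LEMMAS AND PROOFS =====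

theorem pvBodyA_eq (d : PySem.Dict (List String) (List (List String))) (k : List String) (v : List String) :
    ((if d.contains k then d else d.insert k []).modify k [] (· ++ [v])) = d.modify k [] (· ++ [v]) := by
  by_cases hc : d.contains k
  · rw [if_pos hc]
  · rw [if_neg hc]
    simp only [Bool.not_eq_true] at hc
    simp only [PySem.Dict.modify, PySem.Dict.getD_insert_self, PySem.Dict.insert_insert_self,
      PySem.Dict.getD_of_not_contains d _ hc]

theorem pvUpdate_of_mem {α : Type} [BEq α] [LawfulBEq α] (s : PySem.Set α) (xs : List α)
    (h : ∀ x ∈ xs, x ∈ s) : s.update xs = s := by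
  induction xs generalizing s with
  | nil => exact PySem.Set.update_nil s
  | cons x xs ih =>
    rw [PySem.Set.update_cons, PySem.Set.add_of_mem (h x (by simp))]
    exact ih s (fun y hy => h y (by simp [hy]))

theorem pvGetD_zeroInit (vs : List String) (d : PySem.Dict String Int) (x : String)
    (h : d.getD x 0 = 0) : (vs.foldl (fun c w => c.insert w 0) d).getD x 0 = 0 := by
  induction vs generalizing d with
  | nil => exact h
  | cons w vs ih =>
    simp only [List.foldl_cons]
    exact ih _ (by rw [PySem.Dict.getD_insert]; split_ifs <;> simp [h])

theorem pvCounts_eq_counter (vs : List String) :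
    vs.foldl (fun c w => c.modify w 0 (· + 1)) (vs.foldl (fun c w => c.insert w 0) PySem.Dict.empty)
      = PySem.Dict.counter vs := by
  apply PySem.Dict.ext
  have hkZ : (vs.foldl (fun c w => c.insert w (0:Int)) PySem.Dict.empty).keys = PySem.Set.ofList vs := by
    rw [PySem.Dict.keys_foldl_insert vs (fun _ _ => 0) PySem.Dict.empty]
    simp [PySem.Dict.keys_empty, PySem.Set.update, PySem.Set.ofList, PySem.Set.empty]
  have hndZ : (vs.foldl (fun c w => c.insert w (0:Int)) PySem.Dict.empty).keys.Nodup := by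
    rw [hkZ]; exact PySem.Set.nodup_ofList vs
  have hk : (vs.foldl (fun c w => c.modify w (0:Int) (· + 1)) (vs.foldl (fun c w => c.insert w (0:Int)) PySem.Dict.empty)).keys = PySem.Set.ofList vs := by
    rw [PySem.Dict.keys_foldl_modify vs 0 (fun _ _ => (· + 1)) _, hkZ]
    exact pvUpdate_of_mem _ _ (fun x hx => (PySem.Set.mem_ofList vs x).mpr hx)
  have hnd : (vs.foldl (fun c w => c.modify w (0:Int) (· + 1)) (vs.foldl (fun c w => c.insert w (0:Int)) PySem.Dict.empty)).keys.Nodup := by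
    rw [hk]; exact PySem.Set.nodup_ofList vs
  conv_lhs => rw [PySem.Dict.items_eq_map_keys _ hnd (0 : Int)]
  rw [PySem.Dict.items_counter, hk]
  apply List.map_congr_left
  intro x hx
  rw [PySem.Dict.getD_foldl_modify_add_one, pvGetD_zeroInit vs _ x (by simp [PySem.Dict.getD_empty])]
  simp
def pvStepG (d : PySem.Dict (List String) (List (List String))) (p : List String × List String) :
    PySem.Dict (List String) (List (List String)) :=
  d.modify p.1 [] (· ++ [p.2])

def pvStepB (d : PySem.Dict (List String) (PySem.Dict String Int)) (p : List String × String) :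
    PySem.Dict (List String) (PySem.Dict String Int) :=
  d.modify p.1 PySem.Dict.empty (fun inner => inner.insert p.2 (inner.getD p.2 0 + 1))

theorem pvMain (ps : List (List String × List String)) (f : List String → String) :
    ((ps.foldl (fun d p => pvStepB d (p.1, f p.2)) PySem.Dict.empty).items)
      = ((ps.foldl pvStepG PySem.Dict.empty).items).map
          (fun q => (q.1, PySem.Dict.counter (q.2.map f))) := by
  induction ps using List.reverseRecOn with
  | nil => simp [PySem.Dict.empty]
  | append_singleton ps p ih =>
    rw [List.foldl_append, List.foldl_append, List.foldl_cons, List.foldl_nil,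
        List.foldl_cons, List.foldl_nil]
    set D := ps.foldl (fun d p => pvStepB d (p.1, f p.2)) PySem.Dict.empty with hD
    set G := ps.foldl pvStepG PySem.Dict.empty with hG
    have hndG : G.keys.Nodup := by
      rw [hG]
      exact PySem.Dict.nodup_keys_foldl_modify_key ps Prod.fst [] (fun _ p => (· ++ [p.2])) _
        (by simp)
    have hkeys : D.keys = G.keys := by
      simp only [PySem.Dict.keys, ih, List.map_map]
      rfl
    have hndD : D.keys.Nodup := hkeys ▸ hndG
    have hcont : D.contains p.1 = G.contains p.1 := by
      rw [PySem.Dict.contains_eq_decide_mem_keys, PySem.Dict.contains_eq_decide_mem_keys, hkeys]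
    simp only [pvStepB, pvStepG, PySem.Dict.modify]
    by_cases hc : G.contains p.1
    · -- existing prefix: both sides replace the entry at p.1
      have hcD : D.contains p.1 = true := by rw [hcont]; exact hc
      rw [PySem.Dict.items_insert, PySem.Dict.items_insert, if_pos hcD, if_pos hc, ih,
          List.map_map, List.map_map]
      apply List.map_congr_left
      intro q hq
      by_cases hqk : q.1 = p.1
      · have hmemD : (p.1, PySem.Dict.counter (q.2.map f)) ∈ D.items := by
          rw [ih]; exact List.mem_map.mpr ⟨q, hq, by rw [hqk]⟩
        have hDget : D.getD p.1 PySem.Dict.empty = PySem.Dict.counter (q.2.map f) :=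
          PySem.Dict.getD_of_mem_items D hmemD hndD _
        have hGget : G.getD p.1 [] = q.2 := by
          have : (p.1, q.2) ∈ G.items := by rw [← hqk]; exact hq
          exact PySem.Dict.getD_of_mem_items G this hndG _
        simp only [Function.comp, hqk, beq_self_eq_true, if_pos, hDget, hGget]
        simp [PySem.Dict.counter_append_singleton, PySem.Dict.modify]
      · simp only [Function.comp]
        rw [if_neg (by simpa using hqk), if_neg (by simpa using hqk)]
    · -- fresh prefix: both sides append
      have hcD : D.contains p.1 = false := by rw [hcont]; simpa using hc
      rw [PySem.Dict.items_insert, PySem.Dict.items_insert, if_neg (by simp [hcD]),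
          if_neg (by simp [hc]), List.map_append, ih]
      simp only [Bool.not_eq_true] at hc hcD
      rw [PySem.Dict.getD_of_not_contains D _ hcD, PySem.Dict.getD_of_not_contains G _ hc]
      simp [PySem.Dict.counter, PySem.Dict.modify, PySem.Dict.empty]
theorem pvSliceEq (words : List String) (n : Int) (hn : 1 ≤ n) (i : Int)
    (hi : 0 ≤ i) (him : i < (words.length : Int) - (n - 1)) :
    PySem.List.slice (PySem.List.slice words (some i) (some (i + n))) none (some (n - 1))
      = PySem.List.slice words (some i) (some (i + n - 1)) := by
  obtain ⟨j, rfl⟩ : ∃ j : Nat, i = (j : Int) := ⟨i.toNat, (Int.toNat_of_nonneg hi).symm⟩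
  obtain ⟨nn, rfl⟩ : ∃ m : Nat, n = (m : Int) := ⟨n.toNat, (Int.toNat_of_nonneg (by omega)).symm⟩
  have h1 : (j : Int) + nn = ((j + nn : Nat) : Int) := by push_cast; ring
  have h2 : ((j + nn : Nat) : Int) - 1 = ((j + nn - 1 : Nat) : Int) := by omega
  have h3 : (nn : Int) - 1 = ((nn - 1 : Nat) : Int) := by omega
  rw [h1, h2, PySem.List.slice_natCast, PySem.List.slice_natCast, h3,
      PySem.List.slice_to _ (by positivity)]
  rw [Int.toNat_natCast, List.take_take]
  congr 1; omega

theorem pvLastEq (words : List String) (n : Int) (hn : 1 ≤ n) (i : Int)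
    (hi : 0 ≤ i) (him : i < (words.length : Int) - (n - 1)) :
    PySem.List.pyGet? (PySem.List.slice words (some i) (some (i + n))) (-1)
      = PySem.List.pyGet? words (i + n - 1) := by
  obtain ⟨j, rfl⟩ : ∃ j : Nat, i = (j : Int) := ⟨i.toNat, (Int.toNat_of_nonneg hi).symm⟩
  obtain ⟨nn, rfl⟩ : ∃ m : Nat, n = (m : Int) := ⟨n.toNat, (Int.toNat_of_nonneg (by omega)).symm⟩
  have hle : j + nn ≤ words.length := by omega
  have h1 : (j : Int) + nn = ((j + nn : Nat) : Int) := by push_cast; ring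
  have h2 : ((j + nn : Nat) : Int) - 1 = ((j + nn - 1 : Nat) : Int) := by omega
  rw [h1, h2, PySem.List.slice_natCast, PySem.List.pyGet?_natCast]
  have hlen : (List.take (j + nn - j) (List.drop j words)).length = nn := by
    simp [List.length_take, List.length_drop]; omega
  simp only [PySem.List.pyGet?, PySem.List.pyIdx?, hlen]
  rw [if_neg (by omega), if_pos (show -((nn : Nat) : Int) ≤ -1 by omega)]
  have hidx : nn - (-(-1 : Int)).toNat = nn - 1 := by omega
  rw [hidx]
  simp only [Option.bind]
  rw [List.getElem?_take_of_lt (by omega), List.getElem?_drop]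
  congr 1
  omega

-- the explicit loop bodies of the two ports, for readable rewriting
def pvBodyA (words : List String) (n : Int) (d : PySem.Dict (List String) (List (List String))) (i : Int) :
    PySem.Dict (List String) (List (List String)) :=
  let ngram := PySem.List.slice words (some i) (some (i + n))
  let pfx := PySem.List.slice ngram none (some (n - 1))
  let d' := if d.contains pfx then d else d.insert pfx []
  d'.modify pfx [] (· ++ [ngram])

def pvLastf (g : List String) : String := (PySem.List.pyGet? g (-1)).getD ""

def pvCounts (vs : List String) : PySem.Dict String Int :=
  vs.foldl (fun c w => c.modify w 0 (· + 1)) (vs.foldl (fun c w => c.insert w 0) PySem.Dict.empty)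

def pvBody2 (d : PySem.Dict (List String) (PySem.Dict String Int))
    (p : List String × List (List String)) : PySem.Dict (List String) (PySem.Dict String Int) :=
  d.insert p.1 (pvCounts (p.2.map pvLastf))

def pvBodyB (words : List String) (n : Int) (d : PySem.Dict (List String) (PySem.Dict String Int)) (i : Int) :
    PySem.Dict (List String) (PySem.Dict String Int) :=
  let pfx := PySem.List.slice words (some i) (some (i + n - 1))
  let cont := (PySem.List.pyGet? words (i + n - 1)).getD ""
  d.modify pfx PySem.Dict.empty (fun inner => inner.insert cont (inner.getD cont 0 + 1))

theorem pvTop (words : List String) (n : Int) (hn : 1 ≤ n) :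
    (((PySem.List.pyRange 0 ((words.length : Int) - (n - 1))).foldl (pvBodyA words n)
        PySem.Dict.empty).items.foldl pvBody2 PySem.Dict.empty).items.map (fun p => (p.1, p.2.items))
      = ((PySem.List.pyRange 0 ((words.length : Int) - (n - 1))).foldl (pvBodyB words n)
          PySem.Dict.empty).items.map (fun p => (p.1, p.2.items)) := by
  set R := PySem.List.pyRange 0 ((words.length : Int) - (n - 1)) with hRdef
  have hmem : ∀ i ∈ R, 0 ≤ i ∧ i < (words.length : Int) - (n - 1) := by
    intro i hi
    exact PySem.List.mem_pyRange_one.mp hi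
  -- the (prefix, ngram) pairs the loops run over
  set ps : List (List String × List String) :=
    R.map (fun i => (PySem.List.slice words (some i) (some (i + n - 1)),
                     PySem.List.slice words (some i) (some (i + n)))) with hps
  set G := ps.foldl pvStepG PySem.Dict.empty with hG
  -- A's first loop is the grouping fold over ps
  have hA1 : R.foldl (pvBodyA words n) PySem.Dict.empty = G := by
    rw [hG, hps, List.foldl_map]
    apply PySem.List.foldl_congr_mem
    intro acc i hi
    obtain ⟨h0, h1⟩ := hmem i hi
    simp only [pvBodyA, pvStepG]
    rw [pvBodyA_eq, pvSliceEq words n hn i h0 h1]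
  have hndG : G.keys.Nodup := by
    rw [hG]
    exact PySem.Dict.nodup_keys_foldl_modify_key ps Prod.fst [] (fun _ p => (· ++ [p.2])) _
      (by simp)
  -- A's second loop inserts fresh, distinct keys, so it is a map over G.items
  have hA2 : (G.items.foldl pvBody2 PySem.Dict.empty).items
      = G.items.map (fun p => (p.1, pvCounts (p.2.map pvLastf))) := by
    have := PySem.Dict.items_foldl_insert_fresh G.items Prod.fst
      (fun p => pvCounts (p.2.map pvLastf)) PySem.Dict.empty
      (fun a _ => by simp [PySem.Dict.contains_empty]) hndG
    simpa [PySem.Dict.items] using this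
  -- B's loop is the nested-counter fold over ps
  have hB1 : R.foldl (pvBodyB words n) PySem.Dict.empty
      = ps.foldl (fun d p => pvStepB d (p.1, pvLastf p.2)) PySem.Dict.empty := by
    rw [hps, List.foldl_map]
    apply PySem.List.foldl_congr_mem
    intro acc i hi
    obtain ⟨h0, h1⟩ := hmem i hi
    simp only [pvBodyB, pvStepB]
    rw [show pvLastf (PySem.List.slice words (some i) (some (i + n)))
        = (PySem.List.pyGet? words (i + n - 1)).getD "" by
      rw [pvLastf, pvLastEq words n hn i h0 h1]]
  rw [hA1, hA2, hB1, pvMain ps pvLastf]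
  congr 1
  apply List.map_congr_left
  intro q hq
  rw [pvCounts, pvCounts_eq_counter]

-- ===== VERDICT (by name: the statement is the Claim_ definition above) =====
theorem extract_continuation_probabilities_spec : Claim_equal_extract_continuation_probabilities := by
  intro words n _ hpre
  unfold Spec_extract_continuation_probabilities
  exact pvTop words n hpre
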